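-- pv_equiv track=rewrite | github.com/artyomshutoff/discrete_math_pm_lstu_2 | Должно быть/to_nand_nor.py | nesting_sort
-- ===== SOURCE A (Python) =====
-- def list_subset(r1, r2):
-- 	if not r1: return True
-- 	if not r2: return False
-- 	return r2[0] < r1[0] and r1[1] < r2[1]
--
-- def nesting_sort(funcs):
-- 	res = []
-- 	for i in funcs:
-- 		res.append(0)
-- 		without_i = funcs[:]
-- 		without_i.remove(i)
-- 		for j in without_i:
-- 			if list_subset(i, j):
-- 				res[-1] += 1
-- 	return [i for _, i in sorted(zip(res, funcs), key = lambda x: x[0], reverse = True)]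
-- ===== SOURCE B (Python) =====
-- # Different algorithm: sweep over distinct left endpoints in ascending order,
-- # keeping an ordered list of right endpoints of already-passed intervals and
-- # counting strict containers by binary search; final ordering by counting sort
-- # (buckets per count, emitted from the highest count down).
--
-- def _bisect_right(a, v):
-- 	lo = 0
-- 	hi = len(a)
-- 	while lo < hi:
-- 		mid = (lo + hi) // 2
-- 		if a[mid] <= v:
-- 			lo = mid + 1
-- 		else:
-- 			hi = mid
-- 	return lo
--
-- def nesting_sort(funcs):
-- 	groups = {}
-- 	for k, (a, b) in enumerate(funcs):
-- 		groups.setdefault(a, []).append((k, b))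
-- 	counts = {}
-- 	seconds = []
-- 	for a in sorted(groups):
-- 		grp = groups[a]
-- 		for k, b in grp:
-- 			counts[k] = len(seconds) - _bisect_right(seconds, b)
-- 		for k, b in grp:
-- 			seconds.insert(_bisect_right(seconds, b), b)
-- 	buckets = {}
-- 	for k, f in enumerate(funcs):
-- 		buckets.setdefault(counts[k], []).append(f)
-- 	return [f for c in sorted(buckets, reverse=True) for f in buckets[c]]
-- ===== Notes on version B (the rewrite author's own statement) =====
-- stated objective: faster
-- what changed: A counts containers for each interval with a quadratic all-pairs scan (copying and list.remove-ing per element) and orders the result with a stable reverse comparison sort; B sweeps the intervals grouped by ascending left endpoint, keeping an ordered list of already-passed right endpoints and counting strict containers by binary search, then produces the final order by a counting sort (buckets per count, emitted from the highest count down).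
import Mathlib
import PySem

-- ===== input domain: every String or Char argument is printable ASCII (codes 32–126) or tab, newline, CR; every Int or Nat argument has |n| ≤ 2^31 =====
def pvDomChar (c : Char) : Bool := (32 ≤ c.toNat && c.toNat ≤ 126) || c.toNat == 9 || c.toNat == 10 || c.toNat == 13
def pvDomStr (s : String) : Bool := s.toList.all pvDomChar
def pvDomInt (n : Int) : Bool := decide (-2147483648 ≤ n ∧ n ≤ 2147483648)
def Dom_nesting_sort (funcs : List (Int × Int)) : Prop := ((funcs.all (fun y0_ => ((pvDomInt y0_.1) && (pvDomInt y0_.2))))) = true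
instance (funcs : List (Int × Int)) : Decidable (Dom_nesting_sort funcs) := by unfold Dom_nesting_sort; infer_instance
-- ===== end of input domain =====

-- B replaces A's quadratic all-pairs count by a left-endpoint sweep with binary search
-- and A's comparison sort by a counting sort over count buckets; same return value.

-- ===== PORT A =====
-- 'not r1' / 'not r2' are always False on the pairs this function receives, so only the
-- final comparison line remains.
def list_subset (r1 r2 : Int × Int) : Bool := decide (r2.1 < r1.1) && decide (r1.2 < r2.2)

-- 'res.append(0)' followed by 'res[-1] += 1' inside the inner loop is rendered as the
-- running counter c, appended once the inner loop is done (same values, same order).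
-- 'without_i.remove(i)' never raises (i ∈ funcs), so remove?'s none branch is unreachable.
def nesting_sort (funcs : List (Int × Int)) : List (Int × Int) :=
  let res := funcs.foldl (fun res i =>
    let without_i := (PySem.List.remove? funcs i).getD []
    let c := without_i.foldl (fun c j => if list_subset i j then c + 1 else c) (0 : Int)
    res ++ [c]) []
  (PySem.List.sorted (res.zip funcs) (fun x => x.1) true).map (fun x => x.2)

-- ===== PORT B =====
-- hand-written bisect_right of Source B; 'a[mid]' always has mid < len(a) while the loop
-- runs with hi ≤ len(a), so getD's default is unreachable; '(lo+hi)//2' on naturals is /;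
-- the local 'mid = (lo + hi) // 2' of Source B is inlined at its three uses; the fuel
-- argument (≥ hi - lo at every call) only makes the while loop structurally recursive.
def bisect_right_loop (a : List Int) (v : Int) (lo hi : Nat) : Nat → Nat
  | 0 => lo
  | fuel + 1 =>
    if lo < hi then
      if a.getD ((lo + hi) / 2) 0 ≤ v then bisect_right_loop a v ((lo + hi) / 2 + 1) hi fuel
      else bisect_right_loop a v lo ((lo + hi) / 2) fuel
    else lo

def bisect_right (a : List Int) (v : Int) : Nat := bisect_right_loop a v 0 a.length a.length

-- 'groups.setdefault(x, []).append(y)' is Dict.modify x [] (· ++ [y]);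
-- 'counts[k]' in the buckets loop is total here (every index is set by the sweep),
-- so it is read with getD.
def nesting_sort_alt (funcs : List (Int × Int)) : List (Int × Int) :=
  let groups : PySem.Dict Int (List (Int × Int)) :=
    (PySem.List.enumerate funcs).foldl
      (fun d p => d.modify p.2.1 [] (· ++ [(p.1, p.2.2)])) PySem.Dict.empty
  let st := (PySem.List.sorted groups.keys (fun x => x) false).foldl
    (fun (st : PySem.Dict Int Int × List Int) a =>
      let grp := groups.getD a []
      let counts := grp.foldl
        (fun c p => c.insert p.1 ((st.2.length : Int) - (bisect_right st.2 p.2 : Int))) st.1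
      let seconds := grp.foldl
        (fun s p => PySem.List.insert s ((bisect_right s p.2 : Int)) p.2) st.2
      (counts, seconds))
    (PySem.Dict.empty, [])
  let counts := st.1
  let buckets : PySem.Dict Int (List (Int × Int)) :=
    (PySem.List.enumerate funcs).foldl
      (fun d p => d.modify (counts.getD p.1 0) [] (· ++ [p.2])) PySem.Dict.empty
  (PySem.List.sorted buckets.keys (fun x => x) true).flatMap (fun c => buckets.getD c [])

-- ===== PRECONDITION & SPEC =====
def Spec_nesting_sort (funcs : List (Int × Int)) (out : List (Int × Int)) : Prop := out = nesting_sort_alt funcs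
instance (funcs : List (Int × Int)) (out : List (Int × Int)) : Decidable (Spec_nesting_sort funcs out) := by unfold Spec_nesting_sort; infer_instance

-- ===== CLAIM (what is proved, stated in full; the proofs are below) =====
def Claim_equal_nesting_sort : Prop := ∀ (funcs : List (Int × Int)), Dom_nesting_sort funcs → Spec_nesting_sort funcs (nesting_sort funcs)

-- ===== LEMMAS AND PROOFS =====

-- the number of intervals of funcs strictly containing f (the value A stores in res)
def cnt (funcs : List (Int × Int)) (f : Int × Int) : Int :=
  (funcs.countP (fun j => list_subset f j) : Int)

-- the group of (index, right endpoint) entries of left endpoint a, as B's groups dict holds it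
def G (funcs : List (Int × Int)) (a : Int) : List (Int × Int) :=
  ((PySem.List.enumerate funcs).filter (fun p => p.2.1 == a)).map (fun p => (p.1, p.2.2))

-- ---- A-side ----
theorem foldl_append_map {α β : Type} (l : List α) (g : α → β) (acc : List β) :
    l.foldl (fun r i => r ++ [g i]) acc = acc ++ l.map g := by
  induction l generalizing acc with
  | nil => simp
  | cons x t ih => simp [List.foldl_cons, ih]

theorem foldl_count_if {α : Type} (l : List α) (p : α → Bool) (c0 : Int) :
    l.foldl (fun c j => if p j then c + 1 else c) c0 = c0 + (l.countP p : Int) := by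
  induction l generalizing c0 with
  | nil => simp
  | cons x t ih =>
    by_cases h : p x <;> simp [h, ih, add_comm, add_left_comm]

theorem countP_erase_of_neg (l : List (Int × Int)) (a : Int × Int) (p : (Int × Int) → Bool)
    (h : p a = false) : (l.erase a).countP p = l.countP p := by
  induction l with
  | nil => simp
  | cons b t ih =>
    by_cases hba : b = a
    · subst hba; simp [List.erase_cons_head, h]
    · rw [List.erase_cons_tail (by simpa using hba)]
      simp [List.countP_cons, ih]

theorem zip_map_fst {α β : Type} (l : List α) (g : α → β) :
    (l.map g).zip l = l.map (fun x => (g x, x)) := by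
  induction l with
  | nil => rfl
  | cons x t ih => simp [ih]

theorem A_canon (funcs : List (Int × Int)) :
    nesting_sort funcs =
      (PySem.List.sorted (funcs.map (fun f => (cnt funcs f, f))) (fun x => x.1) true).map
        (fun x => x.2) := by
  have hres : (funcs.foldl (fun res i =>
      let without_i := (PySem.List.remove? funcs i).getD []
      let c := without_i.foldl (fun c j => if list_subset i j then c + 1 else c) (0 : Int)
      res ++ [c]) []) = funcs.map (cnt funcs) := by
    have h0 := foldl_append_map funcs (fun i =>
      ((PySem.List.remove? funcs i).getD []).foldl
        (fun c j => if list_subset i j then c + 1 else c) (0 : Int)) []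
    rw [h0, List.nil_append]
    apply List.map_congr_left
    intro i hi
    rw [PySem.List.remove?_eq_some_erase funcs i hi, Option.getD_some, foldl_count_if,
      countP_erase_of_neg funcs i _ (by simp [list_subset])]
    unfold cnt
    simp
  simp only [nesting_sort]
  rw [hres, zip_map_fst]

-- ---- stable reverse sort = buckets by strictly descending key ----
theorem insertBy_mid {α : Type} (before : α → α → Bool) (x w : α) (l1 l2 : List α)
    (h1 : ∀ y ∈ l1, before x y = false) (hw : before x w = true) :
    PySem.List.insertBy before x (l1 ++ w :: l2) = l1 ++ x :: w :: l2 := by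
  induction l1 with
  | nil => simp [PySem.List.insertBy, hw]
  | cons y t ih =>
    have hy : before x y = false := h1 y (by simp)
    simp only [List.cons_append, PySem.List.insertBy, hy, Bool.false_eq_true, if_false]
    rw [ih (fun y hy => h1 y (by simp [hy]))]

theorem flatMap_congr_mem {α β : Type} (l : List α) (f g : α → List β)
    (h : ∀ x ∈ l, f x = g x) : l.flatMap f = l.flatMap g := by
  induction l with
  | nil => rfl
  | cons x t ih => simp [List.flatMap_cons, h x (by simp), ih (fun y hy => h y (by simp [hy]))]

theorem insert_into_buckets {α : Type} (z : Int × α) (zs : List (Int × α)) (A B : List Int)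
    (hAgt : ∀ a ∈ A, z.1 < a) (hBlt : ∀ b ∈ B, b < z.1) :
    PySem.List.insertBy (fun p q => decide (q.1 < p.1)) z
      (A.flatMap (fun c => zs.filter (fun q => q.1 == c)) ++
        (zs.filter (fun q => q.1 == z.1) ++ B.flatMap (fun c => zs.filter (fun q => q.1 == c))))
    = A.flatMap (fun c => zs.filter (fun q => q.1 == c)) ++
        (zs.filter (fun q => q.1 == z.1) ++ (z :: B.flatMap (fun c => zs.filter (fun q => q.1 == c)))) := by
  have h1 : ∀ y ∈ A.flatMap (fun c => zs.filter (fun q => q.1 == c)) ++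
      zs.filter (fun q => q.1 == z.1), (decide (y.1 < z.1)) = false := by
    intro y hy
    rcases List.mem_append.1 hy with hy | hy
    · obtain ⟨c, hc, hyc⟩ := List.mem_flatMap.1 hy
      have : y.1 = c := by simpa using (List.mem_filter.1 hyc).2
      simp only [decide_eq_false_iff_not]
      have := hAgt c hc
      omega
    · have : y.1 = z.1 := by simpa using (List.mem_filter.1 hy).2
      simp [this]
  cases hB : B.flatMap (fun c => zs.filter (fun q => q.1 == c)) with
  | nil =>
    rw [List.append_nil,
      PySem.List.insertBy_of_forall_not_before _ _ _ (fun y hy => h1 y hy), List.append_assoc]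
  | cons w tail =>
    have hw : w.1 < z.1 := by
      have hwmem : w ∈ B.flatMap (fun c => zs.filter (fun q => q.1 == c)) := by
        rw [hB]; exact List.mem_cons_self
      obtain ⟨b, hb, hwb⟩ := List.mem_flatMap.1 hwmem
      have : w.1 = b := by simpa using (List.mem_filter.1 hwb).2
      have := hBlt b hb
      omega
    rw [← List.append_assoc, insertBy_mid _ _ _ _ _ (fun y hy => h1 y hy) (by simpa using hw),
      List.append_assoc]

theorem stable_rev_buckets {α : Type} (zs : List (Int × α)) : ∀ (ks : List Int),
    ks.Pairwise (fun a b => b < a) → (∀ c : Int, c ∈ ks ↔ c ∈ zs.map Prod.fst) →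
    PySem.List.sorted zs (fun z => z.1) true
      = ks.flatMap (fun c => zs.filter (fun z => z.1 == c)) := by
  induction zs using List.reverseRecOn with
  | nil =>
    intro ks hp hmem
    have hks : ks = [] := by
      cases ks with
      | nil => rfl
      | cons c t => exact absurd ((hmem c).1 (by simp)) (by simp)
    subst hks
    simp [PySem.List.sorted_rev_eq_foldl_insertBy]
  | append_singleton zs z ih =>
    intro ks hp hmem
    have hc0mem : z.1 ∈ ks := (hmem z.1).2 (by simp)
    obtain ⟨A, B, rfl⟩ := List.append_of_mem hc0mem
    obtain ⟨hA, hcB, hAB⟩ := List.pairwise_append.1 hp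
    obtain ⟨hc0B, hB⟩ := List.pairwise_cons.1 hcB
    have hAgt : ∀ a ∈ A, z.1 < a := fun a ha => hAB a ha z.1 (by simp)
    have hBmem : ∀ b ∈ B, b ∈ zs.map Prod.fst := by
      intro b hb
      have h := (hmem b).1 (by simp [hb])
      rw [List.map_append] at h
      rcases List.mem_append.1 h with h | h
      · exact h
      · have : b = z.1 := by simpa using h
        exact absurd (this ▸ hc0B b hb) (lt_irrefl _)
    have hAmem : ∀ a ∈ A, a ∈ zs.map Prod.fst := by
      intro a ha
      have h := (hmem a).1 (by simp [ha])
      rw [List.map_append] at h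
      rcases List.mem_append.1 h with h | h
      · exact h
      · have : a = z.1 := by simpa using h
        exact absurd (this ▸ hAgt a ha) (lt_irrefl _)
    have hstep : PySem.List.sorted (zs ++ [z]) (fun q => q.1) true
        = PySem.List.insertBy (fun p q => decide (q.1 < p.1)) z
            (PySem.List.sorted zs (fun q => q.1) true) := by
      rw [PySem.List.sorted_rev_eq_foldl_insertBy, PySem.List.sorted_rev_eq_foldl_insertBy,
        List.foldl_append]
      rfl
    have hFnew_ne : ∀ c : Int, c ≠ z.1 →
        (zs ++ [z]).filter (fun q => q.1 == c) = zs.filter (fun q => q.1 == c) := by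
      intro c hc
      rw [List.filter_append]
      have : ((z.1 : Int) == c) = false := by simpa using (Ne.symm hc)
      simp [this]
    have hFnew_eq : (zs ++ [z]).filter (fun q => q.1 == z.1)
        = zs.filter (fun q => q.1 == z.1) ++ [z] := by
      rw [List.filter_append]
      simp
    have hAfl : A.flatMap (fun c => (zs ++ [z]).filter (fun q => q.1 == c))
        = A.flatMap (fun c => zs.filter (fun q => q.1 == c)) :=
      flatMap_congr_mem _ _ _ (fun a ha => hFnew_ne a (by have := hAgt a ha; omega))
    have hBfl : B.flatMap (fun c => (zs ++ [z]).filter (fun q => q.1 == c))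
        = B.flatMap (fun c => zs.filter (fun q => q.1 == c)) :=
      flatMap_congr_mem _ _ _ (fun b hb => hFnew_ne b (by have := hc0B b hb; omega))
    by_cases hczs : z.1 ∈ zs.map Prod.fst
    · -- the key sets of zs and zs ++ [z] coincide here
      have hmem'' : ∀ c : Int, c ∈ A ++ z.1 :: B ↔ c ∈ zs.map Prod.fst := by
        intro c
        rw [hmem c, List.map_append]
        simp only [List.mem_append, List.map_cons, List.map_nil, List.mem_singleton]
        constructor
        · rintro (h | h)
          · exact h
          · exact h ▸ hczs
        · exact Or.inl
      rw [hstep, ih (A ++ z.1 :: B) hp hmem'']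
      simp only [List.flatMap_append, List.flatMap_cons]
      rw [hAfl, hBfl, hFnew_eq]
      have := insert_into_buckets z zs A B hAgt hc0B
      simpa [List.append_assoc] using this
    · have hp2 : (A ++ B).Pairwise (fun a b => b < a) :=
        List.pairwise_append.2 ⟨hA, hB, fun a ha b hb => hAB a ha b (List.mem_cons_of_mem _ hb)⟩
      have hmem2 : ∀ c : Int, c ∈ A ++ B ↔ c ∈ zs.map Prod.fst := by
        intro c
        constructor
        · intro h
          rcases List.mem_append.1 h with h | h
          · exact hAmem c h
          · exact hBmem c h
        · intro h
          have h2 : c ∈ A ++ z.1 :: B := (hmem c).2 (by simp [List.map_append, h])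
          have hcne : c ≠ z.1 := fun he => hczs (he ▸ h)
          rcases List.mem_append.1 h2 with h2 | h2
          · exact List.mem_append.2 (Or.inl h2)
          · rcases List.mem_cons.1 h2 with h2 | h2
            · exact absurd h2 hcne
            · exact List.mem_append.2 (Or.inr h2)
      have hFz : zs.filter (fun q => q.1 == z.1) = [] := by
        rw [List.filter_eq_nil_iff]
        intro q hq hq1
        exact hczs (List.mem_map.2 ⟨q, hq, by simpa using hq1⟩)
      rw [hstep, ih (A ++ B) hp2 hmem2, List.flatMap_append]
      have hsplit : A.flatMap (fun c => zs.filter (fun q => q.1 == c)) ++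
          B.flatMap (fun c => zs.filter (fun q => q.1 == c))
          = A.flatMap (fun c => zs.filter (fun q => q.1 == c)) ++
            (zs.filter (fun q => q.1 == z.1) ++
              B.flatMap (fun c => zs.filter (fun q => q.1 == c))) := by
        rw [hFz, List.nil_append]
      rw [hsplit]
      simp only [List.flatMap_append, List.flatMap_cons]
      rw [hAfl, hBfl, hFnew_eq, hFz]
      have := insert_into_buckets z zs A B hAgt hc0B
      rw [hFz] at this
      simpa [List.append_assoc] using this

-- ---- bisect correctness ----
theorem bisect_right_loop_props (a : List Int) (v : Int) (hs : a.Pairwise (· ≤ ·)) :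
    ∀ (d lo hi : Nat), hi - lo ≤ d → lo ≤ hi → hi ≤ a.length →
    lo ≤ bisect_right_loop a v lo hi d ∧ bisect_right_loop a v lo hi d ≤ hi ∧
    (∀ i (h : i < a.length), lo ≤ i → i < bisect_right_loop a v lo hi d → a[i] ≤ v) ∧
    (∀ i (h : i < a.length), bisect_right_loop a v lo hi d ≤ i → i < hi → v < a[i]) := by
  have hmono : ∀ (i j : Nat) (hi : i < a.length) (hj : j < a.length), i ≤ j → a[i] ≤ a[j] := by
    intro i j hi hj hij
    rcases Nat.lt_or_ge i j with h | h
    · exact List.pairwise_iff_getElem.1 hs i j hi hj h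
    · have : i = j := by omega
      subst this; exact le_refl _
  intro d
  induction d with
  | zero =>
    intro lo hi hd hlh hha
    refine ⟨le_refl _, hlh, fun i h h1 h2 => by simp [bisect_right_loop] at h2; omega,
      fun i h h1 h2 => ?_⟩
    simp only [bisect_right_loop] at h1
    omega
  | succ d ihd =>
    intro lo hi hd hlh hha
    rw [show bisect_right_loop a v lo hi (d + 1)
        = if lo < hi then
            (if a.getD ((lo + hi) / 2) 0 ≤ v then bisect_right_loop a v ((lo + hi) / 2 + 1) hi d
             else bisect_right_loop a v lo ((lo + hi) / 2) d)
          else lo from rfl]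
    by_cases hlt : lo < hi
    · rw [if_pos hlt]
      have hmid1 : lo ≤ (lo + hi) / 2 := by omega
      have hmid2 : (lo + hi) / 2 < hi := by omega
      have hmlen : (lo + hi) / 2 < a.length := by omega
      rw [List.getD_eq_getElem a 0 hmlen]
      by_cases hv : a[(lo + hi) / 2] ≤ v
      · rw [if_pos hv]
        obtain ⟨p1, p2, p3, p4⟩ := ihd ((lo + hi) / 2 + 1) hi (by omega) (by omega) hha
        refine ⟨by omega, p2, ?_, ?_⟩
        · intro i h h1 h2
          by_cases hc : (lo + hi) / 2 + 1 ≤ i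
          · exact p3 i h hc h2
          · exact le_trans (hmono i ((lo + hi) / 2) h hmlen (by omega)) hv
        · intro i h h1 h2
          exact p4 i h h1 h2
      · rw [if_neg hv]
        obtain ⟨p1, p2, p3, p4⟩ := ihd lo ((lo + hi) / 2) (by omega) (by omega) (by omega)
        refine ⟨p1, by omega, ?_, ?_⟩
        · intro i h h1 h2
          exact p3 i h h1 h2
        · intro i h h1 h2
          by_cases hc : i < (lo + hi) / 2
          · exact p4 i h h1 hc
          · exact lt_of_lt_of_le (by omega) (hmono ((lo + hi) / 2) i hmlen h (by omega))
    · rw [if_neg hlt]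
      exact ⟨le_refl _, hlh, fun i h h1 h2 => by omega, fun i h h1 h2 => by omega⟩

theorem bisect_right_props (s : List Int) (v : Int) (hs : s.Pairwise (· ≤ ·)) :
    bisect_right s v ≤ s.length ∧
    (∀ i (h : i < s.length), i < bisect_right s v → s[i] ≤ v) ∧
    (∀ i (h : i < s.length), bisect_right s v ≤ i → v < s[i]) := by
  obtain ⟨p1, p2, p3, p4⟩ := bisect_right_loop_props s v hs s.length 0 s.length
    (by omega) (by omega) (le_refl _)
  -- bisect_right s v is bisect_right_loop s v 0 s.length s.length by definition
  exact ⟨p2, fun i h h2 => p3 i h (by omega) h2, fun i h h1 => p4 i h h1 h⟩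

theorem bisect_right_eq (s : List Int) (v : Int) (hs : s.Pairwise (· ≤ ·)) :
    bisect_right s v = s.countP (fun x => decide (x ≤ v)) := by
  obtain ⟨p1, p2, p3⟩ := bisect_right_props s v hs
  conv_rhs => rw [← List.take_append_drop (bisect_right s v) s]
  rw [List.countP_append]
  have h1 : (s.take (bisect_right s v)).countP (fun x => decide (x ≤ v))
      = (s.take (bisect_right s v)).length := by
    rw [List.countP_eq_length]
    intro x hx
    obtain ⟨i, hi, hix⟩ := List.mem_iff_getElem.1 hx
    have hil : i < s.length := by
      have := hi; rw [List.length_take] at this; omega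
    rw [List.getElem_take] at hix
    have : i < bisect_right s v := by
      have := hi; rw [List.length_take] at this; omega
    simpa [← hix] using p2 i hil this
  have h2 : (s.drop (bisect_right s v)).countP (fun x => decide (x ≤ v)) = 0 := by
    rw [List.countP_eq_zero]
    intro x hx
    obtain ⟨i, hi, hix⟩ := List.mem_iff_getElem.1 hx
    have hil : bisect_right s v + i < s.length := by
      have := hi; rw [List.length_drop] at this; omega
    rw [List.getElem_drop] at hix
    have := p3 (bisect_right s v + i) hil (by omega)
    simp [← hix]
    omega
  rw [h1, h2, List.length_take]
  omega

theorem countP_le_lt (s : List Int) (v : Int) :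
    (s.length : Int) - (s.countP (fun x => decide (x ≤ v)) : Int)
      = (s.countP (fun x => decide (v < x)) : Int) := by
  have h := List.length_eq_countP_add_countP (l := s) (fun x => decide (x ≤ v))
  have h2 : s.countP (fun a => decide ¬(decide (a ≤ v) = true))
      = s.countP (fun x => decide (v < x)) := by
    apply List.countP_congr; intro x _; simp
  omega

-- ---- ordered insert keeps sortedness ----
theorem insert_bisect (s : List Int) (v : Int) (hs : s.Pairwise (· ≤ ·)) :
    (PySem.List.insert s ((bisect_right s v : Nat) : Int) v).Pairwise (· ≤ ·) ∧
    (PySem.List.insert s ((bisect_right s v : Nat) : Int) v).Perm (v :: s) := by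
  obtain ⟨p1, p2, p3⟩ := bisect_right_props s v hs
  rw [PySem.List.insert_natCast s (bisect_right s v) v p1]
  constructor
  · rw [List.pairwise_append]
    have hsub1 : (s.take (bisect_right s v)).Sublist s := List.take_sublist _ _
    have hsub2 : (s.drop (bisect_right s v)).Sublist s := List.drop_sublist _ _
    refine ⟨hs.sublist hsub1, ?_, ?_⟩
    · rw [List.pairwise_cons]
      refine ⟨?_, hs.sublist hsub2⟩
      intro x hx
      obtain ⟨i, hi, hix⟩ := List.mem_iff_getElem.1 hx
      have hil : bisect_right s v + i < s.length := by
        have := hi; rw [List.length_drop] at this; omega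
      rw [List.getElem_drop] at hix
      have := p3 (bisect_right s v + i) hil (by omega)
      omega
    · intro x hx y hy
      obtain ⟨i, hi, hix⟩ := List.mem_iff_getElem.1 hx
      have hil : i < s.length := by
        have := hi; rw [List.length_take] at this; omega
      rw [List.getElem_take] at hix
      have hxv : x ≤ v := by
        have : i < bisect_right s v := by
          have := hi; rw [List.length_take] at this; omega
        simpa [← hix] using p2 i hil this
      rcases List.mem_cons.1 hy with hy | hy
      · omega
      · obtain ⟨j, hj, hjy⟩ := List.mem_iff_getElem.1 hy
        have hjl : bisect_right s v + j < s.length := by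
          have := hj; rw [List.length_drop] at this; omega
        rw [List.getElem_drop] at hjy
        have := p3 (bisect_right s v + j) hjl (by omega)
        omega
  · have h3 : (s.take (bisect_right s v) ++ v :: s.drop (bisect_right s v)).Perm
        (v :: (s.take (bisect_right s v) ++ s.drop (bisect_right s v))) := List.perm_middle
    rw [List.take_append_drop] at h3
    exact h3

theorem seconds_fold (grp : List (Int × Int)) : ∀ (s : List Int), s.Pairwise (· ≤ ·) →
    (grp.foldl (fun s p => PySem.List.insert s ((bisect_right s p.2 : Int)) p.2) s).Pairwise (· ≤ ·) ∧
    (grp.foldl (fun s p => PySem.List.insert s ((bisect_right s p.2 : Int)) p.2) s).Perm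
      (s ++ grp.map (·.2)) := by
  induction grp with
  | nil => intro s hs; exact ⟨hs, by simp⟩
  | cons p t ih =>
    intro s hs
    obtain ⟨h1, h2⟩ := insert_bisect s p.2 hs
    obtain ⟨ih1, ih2⟩ := ih _ h1
    refine ⟨ih1, ?_⟩
    rw [List.foldl_cons, List.map_cons]
    refine ih2.trans ?_
    exact (h2.append_right _).trans List.perm_middle.symm

-- ---- dict folds ----
theorem get?_foldl_insert_of_not_mem (l : List (Int × Int)) (w : Int × Int → Int) :
    ∀ (cd : PySem.Dict Int Int) (q : Int), (∀ p ∈ l, p.1 ≠ q) →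
    (l.foldl (fun c p => c.insert p.1 (w p)) cd).get? q = cd.get? q := by
  induction l with
  | nil => intro cd q h; rfl
  | cons p t ih =>
    intro cd q h
    rw [List.foldl_cons, ih _ _ (fun y hy => h y (by simp [hy]))]
    rw [PySem.Dict.get?_insert]
    simp [(h p (by simp)).symm]

theorem get?_foldl_insert_of_mem (l : List (Int × Int)) (w : Int × Int → Int) :
    ∀ (cd : PySem.Dict Int Int) (k b : Int), (k, b) ∈ l → (l.map (·.1)).Nodup →
    (l.foldl (fun c p => c.insert p.1 (w p)) cd).get? k = some (w (k, b)) := by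
  induction l with
  | nil => intro cd k b hmem _; simp at hmem
  | cons p t ih =>
    intro cd k b hmem hnd
    rw [List.map_cons, List.nodup_cons] at hnd
    rcases List.mem_cons.1 hmem with h | h
    · subst h
      rw [List.foldl_cons, get?_foldl_insert_of_not_mem t w _ k ?_]
      · simp
      · intro y hy hyk
        exact hnd.1 (by simpa [hyk] using
          List.mem_map_of_mem (f := fun p : Int × Int => p.1) hy)
    · exact ih _ k b h hnd.2

-- ---- filters ----
theorem filter_or_perm {α : Type} (l : List α) (p q : α → Bool)
    (hdisj : ∀ x ∈ l, ¬(p x = true ∧ q x = true)) :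
    (l.filter (fun x => p x || q x)).Perm (l.filter p ++ l.filter q) := by
  induction l with
  | nil => simp
  | cons x t ih =>
    have iht := ih (fun y hy => hdisj y (by simp [hy]))
    by_cases hp : p x
    · have hq : q x = false := by
        cases hqc : q x
        · rfl
        · exact absurd ⟨hp, hqc⟩ (hdisj x (by simp))
      simp only [List.filter_cons, hp, hq, Bool.true_or, if_true]
      simpa using iht.cons x
    · by_cases hq : q x
      · simp only [List.filter_cons, hp, hq, Bool.false_or, if_true]
        simp only [Bool.false_eq_true, if_false]
        exact (iht.cons x).trans List.perm_middle.symm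
      · simp only [List.filter_cons, hp, hq, Bool.false_or]
        simp only [Bool.false_eq_true, if_false]
        exact iht

theorem mapsnd_G_aux (a : Int) : ∀ (xs : List (Int × Int)) (st : Int),
    (((PySem.List.enumerate xs st).filter (fun p => p.2.1 == a)).map (fun p => p.2.2))
      = (xs.filter (fun f => f.1 == a)).map (·.2) := by
  intro xs
  induction xs with
  | nil => intro st; rfl
  | cons x t ih =>
    intro st
    by_cases h : x.1 == a <;>
      simp [PySem.List.enumerate, h, ih (st + 1)]

theorem mapsnd_G (funcs : List (Int × Int)) (a : Int) :
    (G funcs a).map (·.2) = (funcs.filter (fun f => f.1 == a)).map (·.2) := by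
  unfold G
  rw [List.map_map]
  exact mapsnd_G_aux a funcs 0

theorem mem_G (funcs : List (Int × Int)) (a : Int) (q : Int × Int) (hq : q ∈ G funcs a) :
    ∃ (k : Nat) (hk : k < funcs.length), q = ((k : Int), funcs[k].2) ∧ funcs[k].1 = a := by
  unfold G at hq
  obtain ⟨p, hp, hpq⟩ := List.mem_map.1 hq
  obtain ⟨hpe, hpa⟩ := List.mem_filter.1 hp
  obtain ⟨k, hk, hpk⟩ := (PySem.List.mem_enumerate_iff funcs 0 p).1 hpe
  refine ⟨k, hk, ?_, ?_⟩
  · rw [← hpq, hpk]; simp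
  · have : p.2.1 = a := by simpa using hpa
    rw [hpk] at this; simpa using this

theorem self_mem_G (funcs : List (Int × Int)) (k : Nat) (hk : k < funcs.length) :
    ((k : Int), funcs[k].2) ∈ G funcs (funcs[k].1) := by
  unfold G
  refine List.mem_map.2 ⟨((k : Int), funcs[k]), List.mem_filter.2 ⟨?_, by simp⟩, rfl⟩
  exact (PySem.List.mem_enumerate_iff funcs 0 _).2 ⟨k, hk, by simp⟩

theorem nodup_fst_G (funcs : List (Int × Int)) (a : Int) : ((G funcs a).map (·.1)).Nodup := by
  unfold G
  rw [List.map_map]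
  have h1 : ((PySem.List.enumerate funcs 0).filter (fun p => p.2.1 == a)).Pairwise
      (fun p q => p.1 < q.1) :=
    (PySem.List.pairwise_lt_enumerate funcs 0).filter _
  have h2 : (((PySem.List.enumerate funcs 0).filter (fun p => p.2.1 == a)).map
      ((fun x => x.1) ∘ fun p => (p.1, p.2.2))).Pairwise (· < ·) := by
    rw [List.pairwise_map]
    exact h1
  exact h2.imp (fun h => ne_of_lt h)

-- ---- the sweep invariant ----
theorem count_val (funcs : List (Int × Int)) (C : Int → Bool) (s : List Int) (a b : Int)
    (hs : s.Pairwise (· ≤ ·)) (hperm : s.Perm ((funcs.filter (fun j => C j.1)).map (·.2)))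
    (hC : ∀ j ∈ funcs, C j.1 = true ↔ j.1 < a) :
    (s.length : Int) - (bisect_right s b : Int) = cnt funcs (a, b) := by
  have h1 : s.countP (fun x => decide (b < x)) = funcs.countP (fun j => list_subset (a, b) j) := by
    rw [hperm.countP_eq, List.countP_map, List.countP_filter]
    apply List.countP_congr
    intro j hj
    simp only [Function.comp, list_subset, Bool.and_eq_true, decide_eq_true_eq]
    constructor
    · rintro ⟨hb2, hc⟩
      exact ⟨(hC j hj).1 hc, hb2⟩
    · rintro ⟨hja, hb2⟩
      exact ⟨hb2, (hC j hj).2 hja⟩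
  rw [bisect_right_eq s b hs, countP_le_lt, h1]
  rfl

theorem sweep (funcs : List (Int × Int)) : ∀ (ks : List Int) (C : Int → Bool)
    (cd : PySem.Dict Int Int) (s : List Int),
    ks.Pairwise (· < ·) →
    (∀ a ∈ ks, ∀ x : Int, C x = true → x < a) →
    (∀ j ∈ funcs, C j.1 = true ∨ j.1 ∈ ks) →
    s.Pairwise (· ≤ ·) →
    s.Perm ((funcs.filter (fun j => C j.1)).map (·.2)) →
    (∀ (k : Nat) (hk : k < funcs.length), C funcs[k].1 = true →
      cd.get? (k : Int) = some (cnt funcs funcs[k])) →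
    ∀ (k : Nat) (hk : k < funcs.length), (C funcs[k].1 = true ∨ funcs[k].1 ∈ ks) →
    (ks.foldl (fun (st : PySem.Dict Int Int × List Int) a =>
        (((G funcs a).foldl
          (fun c p => c.insert p.1 ((st.2.length : Int) - (bisect_right st.2 p.2 : Int))) st.1),
         ((G funcs a).foldl
          (fun s p => PySem.List.insert s ((bisect_right s p.2 : Int)) p.2) st.2)))
      (cd, s)).1.get? (k : Int) = some (cnt funcs funcs[k]) := by
  intro ks
  induction ks with
  | nil =>
    intro C cd s _ _ _ _ _ hcd k hk hcase
    rcases hcase with h | h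
    · exact hcd k hk h
    · simp at h
  | cons a ks' ih =>
    intro C cd s hks hbelow hcover hssort hsperm hcd k hk hcase
    obtain ⟨hahead, hks'⟩ := List.pairwise_cons.1 hks
    have hCa : C a = false := by
      cases hCac : C a
      · rfl
      · exact absurd (hbelow a (by simp) a hCac) (lt_irrefl a)
    have hCiff : ∀ j ∈ funcs, C j.1 = true ↔ j.1 < a := by
      intro j hj
      constructor
      · exact hbelow a (by simp) j.1
      · intro hja
        rcases hcover j hj with h | h
        · exact h
        · rcases List.mem_cons.1 h with h | h
          · omega
          · exact absurd (hahead _ h) (by omega)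
    rw [List.foldl_cons]
    have hdisj : ∀ j ∈ funcs, ¬((fun j => C j.1) j = true ∧ (fun j => j.1 == a) j = true) := by
      rintro j hj ⟨h1, h2⟩
      have : j.1 = a := by simpa using h2
      have := (hCiff j hj).1 h1
      omega
    obtain ⟨hsf1, hsf2⟩ := seconds_fold (G funcs a) s hssort
    refine ih (fun x => C x || x == a)
      ((G funcs a).foldl
        (fun c p => c.insert p.1 ((s.length : Int) - (bisect_right s p.2 : Int))) cd)
      ((G funcs a).foldl
        (fun s p => PySem.List.insert s ((bisect_right s p.2 : Int)) p.2) s)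
      hks' ?_ ?_ hsf1 ?_ ?_ k hk ?_
    · intro b hb x hx
      rcases Bool.or_eq_true_iff.1 hx with h | h
      · exact hbelow b (by simp [hb]) x h
      · have : x = a := by simpa using h
        exact this ▸ hahead b hb
    · intro j hj
      rcases hcover j hj with h | h
      · exact Or.inl (by simp [h])
      · rcases List.mem_cons.1 h with h | h
        · exact Or.inl (by simp [h])
        · exact Or.inr h
    · refine hsf2.trans ?_
      rw [mapsnd_G]
      refine ((hsperm.append_right _).trans ?_)
      rw [← List.map_append]
      exact ((filter_or_perm funcs (fun j => C j.1) (fun j => j.1 == a) hdisj).map (·.2)).symm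
    · intro k2 hk2 hC2
      by_cases hCk2 : C funcs[k2].1 = true
      · rw [get?_foldl_insert_of_not_mem]
        · exact hcd k2 hk2 hCk2
        · intro p hp hpk
          obtain ⟨k3, hk3, hpe, hpa⟩ := mem_G funcs a p hp
          have hkk : k3 = k2 := by
            have : ((k3 : Int)) = (k2 : Int) := by rw [hpe] at hpk; simpa using hpk
            exact_mod_cast this
          subst hkk
          rw [hpa] at hCk2
          rw [hCk2] at hCa
          simp at hCa
      · have hfa : funcs[k2].1 = a := by
          rcases Bool.or_eq_true_iff.1 hC2 with h | h
          · exact absurd h hCk2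
          · simpa using h
        rw [get?_foldl_insert_of_mem (G funcs a) _ cd (k2 : Int) (funcs[k2].2)
          (hfa ▸ self_mem_G funcs k2 hk2) (nodup_fst_G funcs a)]
        have := count_val funcs C s a (funcs[k2].2) hssort hsperm hCiff
        rw [this]
        have hfk : ((a : Int), funcs[k2].2) = funcs[k2] := by
          rw [← hfa]
        rw [hfk]
    · rcases hcase with h | h
      · exact Or.inl (by simp [h])
      · rcases List.mem_cons.1 h with h | h
        · exact Or.inl (by simp [h])
        · exact Or.inr h

theorem groups_getD (funcs : List (Int × Int)) (a : Int) :
    ((PySem.List.enumerate funcs).foldl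
      (fun d p => d.modify p.2.1 [] (· ++ [(p.1, p.2.2)])) PySem.Dict.empty).getD a []
    = G funcs a := by
  have h : ((PySem.List.enumerate funcs).map (fun p => (p.2.1, (p.1, p.2.2)))).foldl
      (fun d p => d.modify p.1 [] (· ++ [p.2])) PySem.Dict.empty
      = (PySem.List.enumerate funcs).foldl
        (fun d p => d.modify p.2.1 [] (· ++ [(p.1, p.2.2)])) PySem.Dict.empty := by
    rw [List.foldl_map]
  rw [← h, PySem.Dict.getD_foldl_modify_append, List.filter_map, List.map_map]
  unfold G
  simp [Function.comp_def, PySem.Dict.getD, PySem.Dict.get?, PySem.Dict.empty]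

theorem enum_map_fst_snd : ∀ (xs : List (Int × Int)) (st : Int),
    (PySem.List.enumerate xs st).map (fun p => p.2.1) = xs.map (·.1) := by
  intro xs
  induction xs with
  | nil => intro st; rfl
  | cons x t ih => intro st; simp [PySem.List.enumerate, ih (st + 1)]

theorem groups_keys (funcs : List (Int × Int)) :
    ((PySem.List.enumerate funcs).foldl
      (fun d p => d.modify p.2.1 [] (· ++ [(p.1, p.2.2)])) PySem.Dict.empty).keys
    = PySem.Set.ofList (funcs.map (·.1)) := by
  rw [PySem.Dict.keys_foldl_modify_key (PySem.List.enumerate funcs) (fun p => p.2.1) []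
    (fun _ p => (· ++ [(p.1, p.2.2)])) PySem.Dict.empty]
  rw [enum_map_fst_snd funcs 0]
  have : (PySem.Dict.empty : PySem.Dict Int (List (Int × Int))).keys = [] := rfl
  rw [this]
  simp [PySem.Set.update, PySem.Set.ofList]

theorem counts_correct (funcs : List (Int × Int)) (k : Nat) (hk : k < funcs.length) :
    ((PySem.List.sorted (PySem.Set.ofList (funcs.map (fun x => x.1))) (fun x => x) false).foldl
      (fun (st : PySem.Dict Int Int × List Int) a =>
        (((G funcs a).foldl
          (fun c p => c.insert p.1 ((st.2.length : Int) - (bisect_right st.2 p.2 : Int))) st.1),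
         ((G funcs a).foldl
          (fun s p => PySem.List.insert s ((bisect_right s p.2 : Int)) p.2) st.2)))
      (PySem.Dict.empty, [])).1.get? (k : Int) = some (cnt funcs funcs[k]) := by
  have hfilt : funcs.filter (fun j => (fun _ : Int => false) j.1) = [] :=
    List.filter_eq_nil_iff.2 (by intro a _; simp)
  refine sweep funcs _ (fun _ => false) PySem.Dict.empty []
    (PySem.List.sorted_ofList_pairwise_lt (funcs.map (fun x => x.1)))
    (by simp) ?_ List.Pairwise.nil (by rw [hfilt]; simp) (by intro k2 hk2 h; simp at h) k hk ?_
  · intro j hj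
    exact Or.inr ((PySem.List.mem_sorted _ _ _ _).2
      ((PySem.Set.mem_ofList _ _).2 (List.mem_map.2 ⟨j, hj, rfl⟩)))
  · exact Or.inr ((PySem.List.mem_sorted _ _ _ _).2
      ((PySem.Set.mem_ofList _ _).2 (List.mem_map.2 ⟨funcs[k], List.getElem_mem hk, rfl⟩)))

theorem buckets_out (funcs : List (Int × Int)) (cd : PySem.Dict Int Int)
    (hcnt : ∀ (k : Nat), k < funcs.length → ∀ (hk : k < funcs.length),
      cd.get? (k : Int) = some (cnt funcs funcs[k])) :
    (PySem.List.sorted ((PySem.List.enumerate funcs).foldl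
        (fun d p => d.modify (cd.getD p.1 0) [] (· ++ [p.2])) PySem.Dict.empty).keys
        (fun x => x) true).flatMap
      (fun c => ((PySem.List.enumerate funcs).foldl
        (fun d p => d.modify (cd.getD p.1 0) [] (· ++ [p.2])) PySem.Dict.empty).getD c [])
    = (PySem.List.sorted (funcs.map (fun f => (cnt funcs f, f))) (fun x => x.1) true).map
        (fun x => x.2) := by
  have hl2 : (PySem.List.enumerate funcs).map (fun p => (cd.getD p.1 0, p.2))
      = funcs.map (fun f => (cnt funcs f, f)) := by
    apply List.ext_getElem
    · simp [PySem.List.length_enumerate]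
    · intro k h1 h2
      simp only [List.getElem_map]
      rw [PySem.List.getElem_enumerate]
      have hk : k < funcs.length := by simpa using h2
      have hg := hcnt k hk hk
      simp [PySem.Dict.getD, hg]
  have hfold : ((PySem.List.enumerate funcs).map (fun p => (cd.getD p.1 0, p.2))).foldl
      (fun d p => d.modify p.1 [] (· ++ [p.2])) PySem.Dict.empty
      = (PySem.List.enumerate funcs).foldl
        (fun d p => d.modify (cd.getD p.1 0) [] (· ++ [p.2])) PySem.Dict.empty := by
    rw [List.foldl_map]
  have hbget : ∀ c : Int, ((PySem.List.enumerate funcs).foldl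
      (fun d p => d.modify (cd.getD p.1 0) [] (· ++ [p.2])) PySem.Dict.empty).getD c []
      = ((funcs.map (fun f => (cnt funcs f, f))).filter (fun q => q.1 == c)).map
          (fun x => x.2) := by
    intro c
    rw [← hfold, hl2, PySem.Dict.getD_foldl_modify_append]
    simp [PySem.Dict.getD, PySem.Dict.get?, PySem.Dict.empty]
  have hbkeys : ((PySem.List.enumerate funcs).foldl
      (fun d p => d.modify (cd.getD p.1 0) [] (· ++ [p.2])) PySem.Dict.empty).keys
      = PySem.Set.ofList ((funcs.map (fun f => (cnt funcs f, f))).map Prod.fst) := by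
    rw [PySem.Dict.keys_foldl_modify_key (PySem.List.enumerate funcs)
      (fun p => cd.getD p.1 0) [] (fun _ p => (· ++ [p.2])) PySem.Dict.empty]
    have h2 : (PySem.List.enumerate funcs).map (fun p => cd.getD p.1 0)
        = (funcs.map (fun f => (cnt funcs f, f))).map Prod.fst := by
      rw [← hl2, List.map_map]
      rfl
    have h3 : (PySem.Dict.empty : PySem.Dict Int (List (Int × Int))).keys = [] := rfl
    rw [h2, h3]
    simp [PySem.Set.update, PySem.Set.ofList]
  have hgt : (PySem.List.sorted
      (PySem.Set.ofList ((funcs.map (fun f => (cnt funcs f, f))).map Prod.fst))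
      (fun x => x) true).Pairwise (fun a b => b < a) := by
    have hge := PySem.List.sorted_pairwise_rev
      (PySem.Set.ofList ((funcs.map (fun f => (cnt funcs f, f))).map Prod.fst)) (fun x => x)
    have hnd := (PySem.List.sorted_perm
      (PySem.Set.ofList ((funcs.map (fun f => (cnt funcs f, f))).map Prod.fst))
      (fun x => x) true).nodup_iff.2 (PySem.Set.nodup_ofList _)
    exact (hge.and hnd).imp (fun h => lt_of_le_of_ne h.1 (Ne.symm h.2))
  have hmemiff : ∀ c : Int, c ∈ PySem.List.sorted
      (PySem.Set.ofList ((funcs.map (fun f => (cnt funcs f, f))).map Prod.fst))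
      (fun x => x) true ↔ c ∈ (funcs.map (fun f => (cnt funcs f, f))).map Prod.fst :=
    fun c => (PySem.List.mem_sorted _ _ _ _).trans (PySem.Set.mem_ofList _ c)
  rw [hbkeys, stable_rev_buckets (funcs.map (fun f => (cnt funcs f, f))) _ hgt hmemiff,
    List.map_flatMap]
  exact flatMap_congr_mem _ _ _ (fun c _ => hbget c)

theorem B_canon (funcs : List (Int × Int)) :
    nesting_sort_alt funcs =
      (PySem.List.sorted (funcs.map (fun f => (cnt funcs f, f))) (fun x => x.1) true).map
        (fun x => x.2) := by
  simp only [nesting_sort_alt, groups_getD, groups_keys]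
  exact buckets_out funcs _ (fun k hk _ => counts_correct funcs k hk)

-- ===== VERDICT (by name: the statement is the Claim_ definition above) =====
theorem nesting_sort_spec : Claim_equal_nesting_sort := by
  intro funcs _
  unfold Spec_nesting_sort
  rw [A_canon, B_canon]
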